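-- pv_equiv track=rewrite | github.com/stanholub/motion-context | server.py | _coverage_priority_index_order
-- ===== SOURCE A (Python) =====
-- from typing import Any, Dict, List, Optional, Tuple
--
-- def _coverage_priority_index_order(count: int) -> List[int]:
--     if count <= 0:
--         return []
--     if count == 1:
--         return [0]
--
--     order: List[int] = [0, count - 1]
--     seen = {0, count - 1}
--     intervals: List[Tuple[int, int]] = [(0, count - 1)]
--
--     while intervals:
--         intervals.sort(key=lambda item: item[1] - item[0], reverse=True)
--         left, right = intervals.pop(0)
--         if right - left <= 1:
--             continue
--
--         mid = (left + right) // 2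
--         if mid in seen:
--             alternatives = [mid + 1, mid - 1]
--             replacement = next(
--                 (
--                     candidate
--                     for candidate in alternatives
--                     if left < candidate < right and candidate not in seen
--                 ),
--                 None,
--             )
--             if replacement is None:
--                 continue
--             mid = replacement
--
--         order.append(mid)
--         seen.add(mid)
--         intervals.append((left, mid))
--         intervals.append((mid, right))
--
--     if len(order) < count:
--         for idx in range(count):
--             if idx in seen:
--                 continue
--             order.append(idx)
--             seen.add(idx)
--
--     return order
-- ===== SOURCE B (Python) =====
-- from typing import List
--
-- def _coverage_priority_index_order(count: int) -> List[int]: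
--     if count <= 0:
--         return []
--     if count == 1:
--         return [0]
--     order: List[int] = [0, count - 1]
--     # buckets[w] = intervals of width w, in insertion order
--     buckets = {count - 1: [(0, count - 1)]}
--     for w in range(count - 1, 1, -1):
--         for left, right in buckets.get(w, ()):
--             mid = (left + right) // 2
--             order.append(mid)
--             buckets.setdefault(mid - left, []).append((left, mid))
--             buckets.setdefault(right - mid, []).append((mid, right))
--     return order
-- ===== Notes on version B (the rewrite author's own statement) =====
-- stated objective: faster
-- what changed: Replaces A's loop that re-sorts the whole interval list on every iteration and pops the widest interval with a single sweep over width-indexed buckets from widest to narrowest (children of a split are always strictly narrower, so one pass suffices), dropping A's dead mid-collision and backfill paths.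
import Mathlib
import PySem

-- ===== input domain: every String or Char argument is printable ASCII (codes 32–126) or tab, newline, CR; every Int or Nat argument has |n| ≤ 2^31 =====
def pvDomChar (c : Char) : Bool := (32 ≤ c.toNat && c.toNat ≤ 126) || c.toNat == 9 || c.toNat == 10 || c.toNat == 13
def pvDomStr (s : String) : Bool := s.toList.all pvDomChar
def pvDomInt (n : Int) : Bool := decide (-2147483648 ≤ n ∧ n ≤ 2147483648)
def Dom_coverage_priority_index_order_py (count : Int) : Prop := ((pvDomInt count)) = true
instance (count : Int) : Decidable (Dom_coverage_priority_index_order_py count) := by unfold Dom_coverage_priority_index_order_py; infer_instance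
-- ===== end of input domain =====

-- B replaces A's sort-the-interval-list-every-iteration loop by one sweep over width-indexed
-- buckets from widest to narrowest (objective: faster).

-- ===== PORT A =====
-- 'intervals.sort(key=lambda item: item[1] - item[0], reverse=True)'
def pvSortA (L : List (Int × Int)) : List (Int × Int) :=
  PySem.List.sorted L (fun p => p.2 - p.1) true

-- the 'while intervals:' loop of A (sort, pop widest, bisect, push the two halves);
-- the Nat argument is plain fuel making the recursion structural (the wrapper passes
-- more than the loop can ever use; nothing else is changed)
def pvLoopA : Nat → List (Int × Int) → List Int → PySem.Set Int → List Int × PySem.Set Int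
  | 0, _, order, seen => (order, seen)
  | fuel + 1, L, order, seen =>
    match pvSortA L with
    | [] => (order, seen)
    | (l, r) :: rest =>
      if r - l ≤ 1 then pvLoopA fuel rest order seen
      else
        if PySem.Set.contains seen (PySem.Int.floordiv (l + r) 2) then
          match List.find?
              (fun c => decide (l < c) && decide (c < r) && !(PySem.Set.contains seen c))
              [PySem.Int.floordiv (l + r) 2 + 1, PySem.Int.floordiv (l + r) 2 - 1] with
          | none => pvLoopA fuel rest order seen
          | some m =>
            pvLoopA fuel (rest ++ [(l, m), (m, r)]) (order ++ [m]) (PySem.Set.add seen m)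
        else
          pvLoopA fuel
            (rest ++ [(l, PySem.Int.floordiv (l + r) 2), (PySem.Int.floordiv (l + r) 2, r)])
            (order ++ [PySem.Int.floordiv (l + r) 2])
            (PySem.Set.add seen (PySem.Int.floordiv (l + r) 2))

def coverage_priority_index_order_py (count : Int) : List Int :=
  if count ≤ 0 then []
  else if count = 1 then [0]
  else
    let st := pvLoopA (2 * count.toNat + 2) [(0, count - 1)] [0, count - 1]
      (PySem.Set.ofList [0, count - 1])
    if (st.1.length : Int) < count then
      ((PySem.List.pyRange 0 count 1).foldl
        (fun acc idx =>
          if PySem.Set.contains acc.2 idx then acc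
          else (acc.1 ++ [idx], PySem.Set.add acc.2 idx)) st).1
    else st.1

-- ===== PORT B =====
-- 'buckets.setdefault(k, []).append(p)'
def pvPush (D : PySem.Dict Int (List (Int × Int))) (k : Int) (p : Int × Int) :
    PySem.Dict Int (List (Int × Int)) :=
  D.insert k (D.getD k [] ++ [p])

-- body of B's inner 'for left, right in buckets.get(w, ())' loop
def pvStepB (st : List Int × PySem.Dict Int (List (Int × Int))) (p : Int × Int) :
    List Int × PySem.Dict Int (List (Int × Int)) :=
  (st.1 ++ [PySem.Int.floordiv (p.1 + p.2) 2],
   pvPush (pvPush st.2 (PySem.Int.floordiv (p.1 + p.2) 2 - p.1) (p.1, PySem.Int.floordiv (p.1 + p.2) 2))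
     (p.2 - PySem.Int.floordiv (p.1 + p.2) 2) (PySem.Int.floordiv (p.1 + p.2) 2, p.2))

def coverage_priority_index_order_py_alt (count : Int) : List Int :=
  if count ≤ 0 then []
  else if count = 1 then [0]
  else
    ((PySem.List.pyRange (count - 1) 1 (-1)).foldl
      (fun st w => (PySem.Dict.getD st.2 w []).foldl pvStepB st)
      ([0, count - 1], PySem.Dict.ofList [(count - 1, [(0, count - 1)])])).1

-- ===== PRECONDITION & SPEC =====
def Spec_coverage_priority_index_order_py (count : Int) (out : List Int) : Prop := out = coverage_priority_index_order_py_alt count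
instance (count : Int) (out : List Int) : Decidable (Spec_coverage_priority_index_order_py count out) := by unfold Spec_coverage_priority_index_order_py; infer_instance

-- ===== CLAIM (what is proved, stated in full; the proofs are below) =====
def Claim_equal_coverage_priority_index_order_py : Prop := ∀ (count : Int), Dom_coverage_priority_index_order_py count → Spec_coverage_priority_index_order_py count (coverage_priority_index_order_py count)

-- ===== LEMMAS AND PROOFS =====

-- loop-measure helper
def pvSumW (L : List (Int × Int)) : Nat :=
  (L.map (fun p => (p.2 - p.1 - 1).toNat)).sum

theorem pvSortA_cons_stats {L rest : List (Int × Int)} {l r : Int}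
    (hS : pvSortA L = (l, r) :: rest) :
    pvSumW L = (r - l - 1).toNat + pvSumW rest ∧ L.length = rest.length + 1 := by
  have hp := PySem.List.sorted_perm L (fun p : Int × Int => p.2 - p.1) true
  rw [pvSortA] at hS
  rw [hS] at hp
  constructor
  · have := (hp.map (fun p : Int × Int => (p.2 - p.1 - 1).toNat)).sum_eq
    simpa [pvSumW] using this.symm
  · simpa using hp.length_eq.symm

theorem pvMid_bounds {l r : Int} (h : ¬ r - l ≤ 1) :
    l < PySem.Int.floordiv (l + r) 2 ∧ PySem.Int.floordiv (l + r) 2 < r := by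
  rw [PySem.Int.floordiv_eq_ediv_of_pos (by norm_num)]
  omega

-- width of an interval
abbrev pvKey (p : Int × Int) : Int := p.2 - p.1

-- one stable insertion of Python's reverse sort
def pvIns (c : Int × Int) (X : List (Int × Int)) : List (Int × Int) :=
  PySem.List.insertBy (fun a b => decide (pvKey b < pvKey a)) c X

abbrev pvDesc (X : List (Int × Int)) : Prop :=
  X.Pairwise (fun a b => pvKey b ≤ pvKey a)

abbrev pvItv (p : Int × Int) (m : Int) : Prop := p.1 < m ∧ m < p.2

abbrev pvDis (p q : Int × Int) : Prop := ∀ m, pvItv p m → ¬ pvItv q m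

abbrev pvINV (L : List (Int × Int)) (seen : PySem.Set Int) : Prop :=
  (∀ p ∈ L, 1 ≤ pvKey p) ∧
  (∀ p ∈ L, ∀ m, pvItv p m → PySem.Set.contains seen m = false) ∧
  L.Pairwise pvDis

abbrev pvGoodD (D : PySem.Dict Int (List (Int × Int))) : Prop :=
  ∀ (v : Int) (p : Int × Int), p ∈ PySem.Dict.getD D v [] → pvKey p = v

-- buckets of widths w, w-1, …, 2 flattened in decreasing width order
def pvFlat (w : Int) (D : PySem.Dict Int (List (Int × Int))) : List (Int × Int) :=
  if _h : w ≤ 1 then [] else PySem.Dict.getD D w [] ++ pvFlat (w - 1) D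
termination_by w.toNat
decreasing_by omega

-- B's outer loop from width w downwards (proof-side model of the pyRange fold)
def pvProcB (w : Int) (D : PySem.Dict Int (List (Int × Int))) (order : List Int) : List Int :=
  if _h : w ≤ 1 then order
  else
    let st := (PySem.Dict.getD D w []).foldl pvStepB (order, D)
    pvProcB (w - 1) st.2 st.1
termination_by w.toNat
decreasing_by omega

-- B's state in the middle of the width-w bucket
def pvProcM (w : Int) (pend : List (Int × Int)) (D : PySem.Dict Int (List (Int × Int)))
    (order : List Int) : List Int :=
  let st := pend.foldl pvStepB (order, D)
  pvProcB (w - 1) st.2 st.1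

theorem pvSortA_singleton (p : Int × Int) : pvSortA [p] = [p] := rfl

theorem pvLoopA_zero (L : List (Int × Int)) (order : List Int) (seen : PySem.Set Int) :
    pvLoopA 0 L order seen = (order, seen) := rfl

theorem pvLoopA_nil_step {fuel : Nat} {L : List (Int × Int)} {order : List Int}
    {seen : PySem.Set Int} (hS : pvSortA L = []) :
    pvLoopA (fuel + 1) L order seen = (order, seen) := by
  rw [pvLoopA]
  split
  · rfl
  · rename_i l r rest h
    rw [hS] at h
    cases h

theorem pvLoopA_cons_step {fuel : Nat} {L rest : List (Int × Int)} {l r : Int}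
    {order : List Int} {seen : PySem.Set Int} (hS : pvSortA L = (l, r) :: rest) :
    pvLoopA (fuel + 1) L order seen =
      (if r - l ≤ 1 then pvLoopA fuel rest order seen
      else
        if PySem.Set.contains seen (PySem.Int.floordiv (l + r) 2) then
          match List.find?
              (fun c => decide (l < c) && decide (c < r) && !(PySem.Set.contains seen c))
              [PySem.Int.floordiv (l + r) 2 + 1, PySem.Int.floordiv (l + r) 2 - 1] with
          | none => pvLoopA fuel rest order seen
          | some m =>
            pvLoopA fuel (rest ++ [(l, m), (m, r)]) (order ++ [m]) (PySem.Set.add seen m)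
        else
          pvLoopA fuel
            (rest ++ [(l, PySem.Int.floordiv (l + r) 2), (PySem.Int.floordiv (l + r) 2, r)])
            (order ++ [PySem.Int.floordiv (l + r) 2])
            (PySem.Set.add seen (PySem.Int.floordiv (l + r) 2))) := by
  rw [pvLoopA]
  split
  · rename_i h
    rw [hS] at h
    cases h
  · rename_i l' r' rest' h
    rw [hS] at h
    injection h with h1 h2
    obtain ⟨rfl, rfl⟩ := Prod.mk.inj h1
    subst h2
    rfl

theorem pvContains_false (s : PySem.Set Int) (m : Int) :
    PySem.Set.contains s m = false ↔ m ∉ s := by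
  rw [← Bool.not_eq_true]
  simp [PySem.Set.contains]

theorem pvContains_add_false (s : PySem.Set Int) (m x : Int) :
    PySem.Set.contains (PySem.Set.add s m) x = false ↔ (x ∉ s ∧ x ≠ m) := by
  rw [pvContains_false, PySem.Set.mem_add]
  constructor
  · intro h
    exact ⟨fun hs => h (Or.inl hs), fun he => h (Or.inr he)⟩
  · rintro ⟨h1, h2⟩ (hs | he)
    exacts [h1 hs, h2 he]

theorem pvDis_symm {p q : Int × Int} (h : pvDis p q) : pvDis q p :=
  fun m hq hp => h m hp hq

theorem pvINV_perm {L L' : List (Int × Int)} {s : PySem.Set Int} (hp : L.Perm L')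
    (h : pvINV L s) : pvINV L' s := by
  obtain ⟨h1, h2, h3⟩ := h
  refine ⟨fun p hp' => h1 p (hp.symm.subset hp'), fun p hp' => h2 p (hp.symm.subset hp'), ?_⟩
  exact (hp.pairwise_iff (fun hx => pvDis_symm hx)).mp h3

-- elements of the sorted list are elements of L, and conversely
theorem pvSortA_mem {L : List (Int × Int)} {p : Int × Int} (h : p ∈ pvSortA L) : p ∈ L :=
  (PySem.List.sorted_perm L (fun p : Int × Int => p.2 - p.1) true).subset h

theorem pvMem_sortA {L : List (Int × Int)} {p : Int × Int} (h : p ∈ L) : p ∈ pvSortA L :=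
  (PySem.List.sorted_perm L (fun p : Int × Int => p.2 - p.1) true).symm.subset h

theorem pvSortA_cons_perm {L rest : List (Int × Int)} {l r : Int}
    (hS : pvSortA L = (l, r) :: rest) : ((l, r) :: rest).Perm L := by
  have hp := PySem.List.sorted_perm L (fun p : Int × Int => p.2 - p.1) true
  rw [pvSortA] at hS
  rw [hS] at hp
  exact hp

theorem pvINV_step {L rest : List (Int × Int)} {l r m : Int} {seen : PySem.Set Int}
    (hS : pvSortA L = (l, r) :: rest) (hinv : pvINV L seen) (h1 : l < m) (h2 : m < r) :
    pvINV (rest ++ [(l, m), (m, r)]) (PySem.Set.add seen m) := by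
  have hperm := pvSortA_cons_perm hS
  have hinvS : pvINV ((l, r) :: rest) seen := pvINV_perm hperm.symm hinv
  obtain ⟨hw, hu, hpw⟩ := hinvS
  have hqitv : pvItv (l, r) m := ⟨h1, h2⟩
  have hDisHead : ∀ p ∈ rest, pvDis (l, r) p := (List.pairwise_cons.mp hpw).1
  refine ⟨?_, ?_, ?_⟩
  · intro p hp
    rcases List.mem_append.mp hp with hp | hp
    · exact hw p (by simp [hp])
    · simp only [List.mem_cons, List.mem_singleton] at hp
      rcases hp with rfl | rfl | h
      · simp only [pvKey]; omega
      · simp only [pvKey]; omega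
      · cases h
  · intro p hp x hx
    rw [pvContains_add_false]
    rcases List.mem_append.mp hp with hpr | hpc
    · refine ⟨(pvContains_false seen x).mp (hu p (by simp [hpr]) x hx), ?_⟩
      rintro rfl
      exact hDisHead p hpr x hqitv hx
    · simp only [List.mem_cons] at hpc
      rcases hpc with rfl | rfl | h
      · obtain ⟨ha, hb⟩ := hx
        simp only at ha hb
        refine ⟨(pvContains_false seen x).mp (hu (l, r) (by simp) x ⟨ha, by omega⟩), by omega⟩
      · obtain ⟨ha, hb⟩ := hx
        simp only at ha hb
        refine ⟨(pvContains_false seen x).mp (hu (l, r) (by simp) x ⟨by omega, hb⟩), by omega⟩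
      · cases h
  · rw [List.pairwise_append]
    refine ⟨(List.pairwise_cons.mp hpw).2, ?_, ?_⟩
    · refine List.pairwise_cons.mpr ⟨?_, List.pairwise_singleton _ _⟩
      intro q hq
      simp only [List.mem_singleton] at hq
      subst hq
      intro x hx1 hx2
      obtain ⟨a1, a2⟩ := hx1
      obtain ⟨b1, b2⟩ := hx2
      simp only at a1 a2 b1 b2
      omega
    · intro a ha b hb
      simp only [List.mem_cons, List.mem_singleton] at hb
      intro x hxa hxb
      have hlr : pvItv (l, r) x := by
        rcases hb with rfl | rfl | h
        · obtain ⟨u1, u2⟩ := hxb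
          simp only at u1 u2
          exact ⟨u1, by omega⟩
        · obtain ⟨u1, u2⟩ := hxb
          simp only at u1 u2
          exact ⟨by omega, u2⟩
        · cases h
      exact hDisHead a ha x hlr hxa

-- ----- stable-sort toolbox -----

theorem pvIns_cons (c y : Int × Int) (ys : List (Int × Int)) :
    pvIns c (y :: ys) = if pvKey y < pvKey c then c :: y :: ys else y :: pvIns c ys := by
  rw [show pvIns c (y :: ys)
      = if (decide (pvKey y < pvKey c)) = true then c :: y :: ys else y :: pvIns c ys from rfl]
  by_cases h : pvKey y < pvKey c
  · simp [h]
  · simp [h]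

theorem pvIns_last {c : Int × Int} {X : List (Int × Int)}
    (h : ∀ p ∈ X, ¬ pvKey p < pvKey c) : pvIns c X = X ++ [c] := by
  apply PySem.List.insertBy_of_forall_not_before
  intro y hy
  simp [h y hy]

theorem pvIns_head {c : Int × Int} {X : List (Int × Int)}
    (h : ∀ p ∈ X, pvKey p < pvKey c) : pvIns c X = c :: X := by
  cases X with
  | nil => rfl
  | cons y ys => rw [pvIns_cons, if_pos (h y (by simp))]

theorem pvIns_skip {c : Int × Int} {P X : List (Int × Int)}
    (h : ∀ p ∈ P, ¬ pvKey p < pvKey c) : pvIns c (P ++ X) = P ++ pvIns c X := by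
  induction P with
  | nil => simp
  | cons p P ih =>
    rw [List.cons_append, pvIns_cons, if_neg (h p (by simp)),
      ih (fun q hq => h q (by simp [hq]))]
    rfl

theorem pvFoldlIns :
    ∀ (xs acc : List (Int × Int)), pvDesc (acc ++ xs) →
      xs.foldl (fun a x => pvIns x a) acc = acc ++ xs := by
  intro xs
  induction xs with
  | nil => intro acc _; simp
  | cons x t ih =>
    intro acc h
    have hx : pvIns x acc = acc ++ [x] := by
      apply pvIns_last
      intro y hy
      have := (List.pairwise_append.mp h).2.2 y hy x (by simp)
      omega
    rw [List.foldl_cons, hx, ih (acc ++ [x]) (by simpa using h)]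
    simp

theorem pvSortA_eq_self {X : List (Int × Int)} (h : pvDesc X) : pvSortA X = X := by
  rw [pvSortA, PySem.List.sorted_rev_eq_foldl_insertBy]
  exact pvFoldlIns X [] (by simpa using h)

theorem pvSortA_append_pair (X : List (Int × Int)) (c1 c2 : Int × Int) (h : pvDesc X) :
    pvSortA (X ++ [c1, c2]) = pvIns c2 (pvIns c1 X) := by
  rw [pvSortA, PySem.List.sorted_rev_eq_foldl_insertBy, List.foldl_append,
    ← PySem.List.sorted_rev_eq_foldl_insertBy X (fun p : Int × Int => p.2 - p.1)]
  have hX : PySem.List.sorted X (fun p : Int × Int => p.2 - p.1) true = X := pvSortA_eq_self h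
  rw [hX]
  rfl

-- ----- pvFlat toolbox -----

theorem pvFlat_le_one {w : Int} (D : PySem.Dict Int (List (Int × Int))) (h : w ≤ 1) :
    pvFlat w D = [] := by
  rw [pvFlat.eq_def, dif_pos h]

theorem pvFlat_unfold {w : Int} (D : PySem.Dict Int (List (Int × Int))) (h : ¬ w ≤ 1) :
    pvFlat w D = PySem.Dict.getD D w [] ++ pvFlat (w - 1) D := by
  rw [pvFlat.eq_def, dif_neg h]

theorem pvFlat_keys {D : PySem.Dict Int (List (Int × Int))} (hD : pvGoodD D) :
    ∀ (n : Nat) (w : Int), w.toNat ≤ n → ∀ p ∈ pvFlat w D, 2 ≤ pvKey p ∧ pvKey p ≤ w := by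
  intro n
  induction n with
  | zero =>
    intro w hw p hp
    rw [pvFlat_le_one D (by omega)] at hp
    cases hp
  | succ n ih =>
    intro w hw p hp
    by_cases h1 : w ≤ 1
    · rw [pvFlat_le_one D h1] at hp
      cases hp
    · rw [pvFlat_unfold D h1] at hp
      rcases List.mem_append.mp hp with hp | hp
      · have := hD w p hp
        omega
      · have := ih (w - 1) (by omega) p hp
        omega

theorem pvFlat_empty {D : PySem.Dict Int (List (Int × Int))} :
    ∀ (n : Nat) (w : Int), w.toNat ≤ n →
      (∀ v : Int, 2 ≤ v → v ≤ w → PySem.Dict.getD D v [] = []) → pvFlat w D = [] := by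
  intro n
  induction n with
  | zero => intro w hw _; exact pvFlat_le_one D (by omega)
  | succ n ih =>
    intro w hw hv
    by_cases h1 : w ≤ 1
    · exact pvFlat_le_one D h1
    · rw [pvFlat_unfold D h1, hv w (by omega) le_rfl,
        ih (w - 1) (by omega) (fun v h2 h3 => hv v h2 (by omega))]
      rfl

theorem pvFlat_push_out {D : PySem.Dict Int (List (Int × Int))} {k : Int} {c : Int × Int} :
    ∀ (n : Nat) (w : Int), w.toNat ≤ n → (k ≤ 1 ∨ w < k) →
      pvFlat w (pvPush D k c) = pvFlat w D := by
  intro n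
  induction n with
  | zero =>
    intro w hw _
    rw [pvFlat_le_one _ (by omega), pvFlat_le_one _ (by omega)]
  | succ n ih =>
    intro w hw hk
    by_cases h1 : w ≤ 1
    · rw [pvFlat_le_one _ h1, pvFlat_le_one _ h1]
    · rw [pvFlat_unfold _ h1, pvFlat_unfold _ h1, ih (w - 1) (by omega) (by omega)]
      have hgd : PySem.Dict.getD (pvPush D k c) w [] = PySem.Dict.getD D w [] := by
        rw [pvPush, PySem.Dict.getD_insert, if_neg (by omega)]
      rw [hgd]

theorem pvGoodD_push {D : PySem.Dict Int (List (Int × Int))} {k : Int} {c : Int × Int}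
    (hD : pvGoodD D) (hc : pvKey c = k) : pvGoodD (pvPush D k c) := by
  intro v p hp
  rw [pvPush, PySem.Dict.getD_insert] at hp
  by_cases hv : v = k
  · rw [if_pos hv] at hp
    rcases List.mem_append.mp hp with hp | hp
    · rw [hD k p hp, hv]
    · simp only [List.mem_singleton] at hp
      rw [hp, hc, hv]
  · rw [if_neg hv] at hp
    exact hD v p hp

theorem pvFlat_push_in {D : PySem.Dict Int (List (Int × Int))} {c : Int × Int}
    {J : List (Int × Int)} :
    ∀ (n : Nat) (w : Int), w.toNat ≤ n → pvGoodD D → 2 ≤ pvKey c → pvKey c ≤ w →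
      (∀ p ∈ J, pvKey p < pvKey c) →
      pvIns c (pvFlat w D ++ J) = pvFlat w (pvPush D (pvKey c) c) ++ J := by
  intro n
  induction n with
  | zero =>
    intro w hw _ h2 hcw _
    exfalso
    omega
  | succ n ih =>
    intro w hw hD h2 hcw hJ
    have h1 : ¬ w ≤ 1 := by omega
    rw [pvFlat_unfold D h1]
    by_cases hk : pvKey c = w
    · rw [List.append_assoc, pvIns_skip (fun p hp => by rw [hD w p hp]; omega),
        pvIns_head (fun p hp => ?_), pvFlat_unfold _ h1]
      · have hgd : PySem.Dict.getD (pvPush D (pvKey c) c) w []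
            = PySem.Dict.getD D w [] ++ [c] := by
          rw [pvPush, PySem.Dict.getD_insert, if_pos hk.symm, hk]
        rw [hgd, pvFlat_push_out n (w - 1) (by omega) (by omega)]
        simp
      · rcases List.mem_append.mp hp with hp | hp
        · have := pvFlat_keys hD n (w - 1) (by omega) p hp
          omega
        · have := hJ p hp
          omega
    · rw [List.append_assoc, pvIns_skip (fun p hp => by rw [hD w p hp]; omega),
        ih (w - 1) (by omega) hD h2 (by omega) hJ, pvFlat_unfold _ h1]
      have hgd : PySem.Dict.getD (pvPush D (pvKey c) c) w [] = PySem.Dict.getD D w [] := by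
        rw [pvPush, PySem.Dict.getD_insert, if_neg (fun hh => hk hh.symm)]
      rw [hgd]
      simp

theorem pvFlat_desc {D : PySem.Dict Int (List (Int × Int))} (hD : pvGoodD D) :
    ∀ (n : Nat) (w : Int), w.toNat ≤ n → pvDesc (pvFlat w D) := by
  intro n
  induction n with
  | zero =>
    intro w hw
    rw [pvFlat_le_one D (by omega)]
    exact List.Pairwise.nil
  | succ n ih =>
    intro w hw
    by_cases h1 : w ≤ 1
    · rw [pvFlat_le_one D h1]
      exact List.Pairwise.nil
    · rw [pvFlat_unfold D h1]
      rw [pvDesc, List.pairwise_append]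
      refine ⟨?_, ih (w - 1) (by omega), ?_⟩
      · apply List.pairwise_of_forall_mem_list
        intro a ha b hb
        rw [hD w a ha, hD w b hb]
      · intro a ha b hb
        rw [hD w a ha]
        have := pvFlat_keys hD n (w - 1) (by omega) b hb
        omega

theorem pvDesc_structured {D : PySem.Dict Int (List (Int × Int))} {w : Int}
    {P J : List (Int × Int)} (hD : pvGoodD D) (hw : 2 ≤ w)
    (hP : ∀ p ∈ P, pvKey p = w) (hJ : ∀ p ∈ J, pvKey p = 1) :
    pvDesc (P ++ pvFlat (w - 1) D ++ J) := by
  rw [pvDesc, List.pairwise_append, List.pairwise_append]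
  refine ⟨⟨?_, pvFlat_desc hD (w - 1).toNat (w - 1) le_rfl, ?_⟩, ?_, ?_⟩
  · apply List.pairwise_of_forall_mem_list
    intro a ha b hb
    rw [hP a ha, hP b hb]
  · intro a ha b hb
    rw [hP a ha]
    have := pvFlat_keys hD (w - 1).toNat (w - 1) le_rfl b hb
    omega
  · apply List.pairwise_of_forall_mem_list
    intro a ha b hb
    rw [hJ a ha, hJ b hb]
  · intro a ha b hb
    rw [hJ b hb]
    rcases List.mem_append.mp ha with ha | ha
    · rw [hP a ha]; omega
    · have := pvFlat_keys hD (w - 1).toNat (w - 1) le_rfl a ha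
      omega

-- the one-insertion step of the simulation
theorem pvInsStep {D : PySem.Dict Int (List (Int × Int))} {brest J : List (Int × Int)}
    {c : Int × Int} {w : Int} (hD : pvGoodD D) (hw : 2 ≤ w)
    (hbrest : ∀ p ∈ brest, pvKey p = w) (hJ : ∀ p ∈ J, pvKey p = 1)
    (h1 : 1 ≤ pvKey c) (h2 : pvKey c ≤ w - 1) :
    pvIns c (brest ++ pvFlat (w - 1) D ++ J) =
      brest ++ pvFlat (w - 1) (pvPush D (pvKey c) c) ++
        (if pvKey c = 1 then J ++ [c] else J) := by
  by_cases hk : pvKey c = 1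
  · rw [if_pos hk, pvIns_last (fun p hp => ?_),
      pvFlat_push_out (w - 1).toNat (w - 1) le_rfl (Or.inl (by omega))]
    · simp
    · rcases List.mem_append.mp hp with hp | hp
      · rcases List.mem_append.mp hp with hp | hp
        · rw [hbrest p hp]; omega
        · have := pvFlat_keys hD (w - 1).toNat (w - 1) le_rfl p hp
          omega
      · rw [hJ p hp]; omega
  · rw [if_neg hk, List.append_assoc,
      pvIns_skip (fun p hp => by rw [hbrest p hp]; omega),
      pvFlat_push_in (w - 1).toNat (w - 1) le_rfl hD (by omega) (by omega)
        (fun p hp => by rw [hJ p hp]; omega)]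
    simp

-- ----- loop lemmas -----

theorem pvLoopA_junk :
    ∀ (f : Nat) (L : List (Int × Int)), L.length ≤ f →
      ∀ (order : List Int) (seen : PySem.Set Int),
      (∀ p ∈ L, pvKey p ≤ 1) → pvLoopA f L order seen = (order, seen) := by
  intro f
  induction f with
  | zero => intro L hL order seen _; exact pvLoopA_zero L order seen
  | succ n ih =>
    intro L hL order seen hk
    cases hS : pvSortA L with
    | nil => exact pvLoopA_nil_step hS
    | cons q rest =>
      obtain ⟨l, r⟩ := q
      rw [pvLoopA_cons_step hS]
      have hmem : (l, r) ∈ L := pvSortA_mem (by rw [hS]; simp)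
      have hsm : r - l ≤ 1 := by
        have := hk (l, r) hmem
        simpa [pvKey] using this
      rw [if_pos hsm]
      have hstats := pvSortA_cons_stats hS
      exact ih rest (by omega) order seen
        (fun p hp => hk p (pvSortA_mem (by rw [hS]; simp [hp])))

theorem pvLoopA_len :
    ∀ (f : Nat) (L : List (Int × Int)), 2 * pvSumW L + L.length ≤ f →
      ∀ (order : List Int) (seen : PySem.Set Int), pvINV L seen →
      (pvLoopA f L order seen).1.length = order.length + pvSumW L := by
  intro f
  induction f with
  | zero =>
    intro L hm order seen _
    have : L = [] := List.eq_nil_of_length_eq_zero (by omega)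
    subst this
    rw [pvLoopA_zero]
    simp [pvSumW]
  | succ n ih =>
    intro L hm order seen hinv
    cases hS : pvSortA L with
    | nil =>
      rw [pvLoopA_nil_step hS]
      have : L = [] := by
        rw [pvSortA] at hS
        exact (PySem.List.sorted_eq_nil_iff L _ true).mp hS
      subst this
      simp [pvSumW]
    | cons q rest =>
      obtain ⟨l, r⟩ := q
      have hstats := pvSortA_cons_stats hS
      have hmem : (l, r) ∈ L := pvSortA_mem (by rw [hS]; simp)
      have hinvS := pvINV_perm (pvSortA_cons_perm hS).symm hinv
      have hinvRest : pvINV rest seen :=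
        ⟨fun p hp => hinvS.1 p (by simp [hp]), fun p hp => hinvS.2.1 p (by simp [hp]),
          (List.pairwise_cons.mp hinvS.2.2).2⟩
      rw [pvLoopA_cons_step hS]
      by_cases hsm : r - l ≤ 1
      · rw [if_pos hsm]
        have h1 : 1 ≤ r - l := by
          have := hinv.1 (l, r) hmem
          simpa [pvKey] using this
        rw [ih rest (by omega) order seen hinvRest]
        have h0 : (r - l - 1).toNat = 0 := by omega
        omega
      · rw [if_neg hsm]
        have hb := pvMid_bounds hsm
        have hcont : PySem.Set.contains seen (PySem.Int.floordiv (l + r) 2) = false :=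
          hinv.2.1 (l, r) hmem _ ⟨hb.1, hb.2⟩
        rw [if_neg (by rw [hcont]; simp)]
        obtain ⟨hb1, hb2⟩ := hb
        have hsum' : pvSumW (rest ++ [(l, PySem.Int.floordiv (l + r) 2),
            (PySem.Int.floordiv (l + r) 2, r)])
            = pvSumW rest + ((PySem.Int.floordiv (l + r) 2 - l - 1).toNat
              + (r - PySem.Int.floordiv (l + r) 2 - 1).toNat) := by
          simp only [pvSumW, List.map_append, List.sum_append, List.map_cons, List.sum_cons,
            List.map_nil, List.sum_nil]
          omega
        rw [ih _ (by
            rw [hsum']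
            simp only [List.length_append, List.length_cons, List.length_nil]
            omega) _ _ (pvINV_step hS hinv hb1 hb2)]
        rw [hsum']
        simp only [List.length_append, List.length_cons, List.length_nil]
        omega

-- ----- B-side lemmas -----

theorem pvProcB_le_one {w : Int} (D : PySem.Dict Int (List (Int × Int))) (o : List Int)
    (h : w ≤ 1) : pvProcB w D o = o := by
  rw [pvProcB.eq_def, dif_pos h]

theorem pvProcB_eq_M {w : Int} (D : PySem.Dict Int (List (Int × Int))) (o : List Int)
    (h : ¬ w ≤ 1) : pvProcB w D o = pvProcM w (PySem.Dict.getD D w []) D o := by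
  rw [pvProcB.eq_def, dif_neg h]
  rfl

theorem pvProcM_nil (w : Int) (D : PySem.Dict Int (List (Int × Int))) (o : List Int) :
    pvProcM w [] D o = pvProcB (w - 1) D o := rfl

theorem pvProcM_cons (w l r : Int) (brest : List (Int × Int))
    (D : PySem.Dict Int (List (Int × Int))) (o : List Int) :
    pvProcM w ((l, r) :: brest) D o =
      pvProcM w brest
        (pvPush (pvPush D (PySem.Int.floordiv (l + r) 2 - l) (l, PySem.Int.floordiv (l + r) 2))
          (r - PySem.Int.floordiv (l + r) 2) (PySem.Int.floordiv (l + r) 2, r))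
        (o ++ [PySem.Int.floordiv (l + r) 2]) := rfl

theorem pvRange_nil {w : Int} (h : w ≤ 1) : PySem.List.pyRange w 1 (-1) = [] := by
  unfold PySem.List.pyRange
  norm_num
  omega

theorem pvRange_cons {w : Int} (h : 1 < w) :
    PySem.List.pyRange w 1 (-1) = w :: PySem.List.pyRange (w - 1) 1 (-1) := by
  unfold PySem.List.pyRange
  norm_num
  rw [if_pos h]
  have hcnt2 : (if (1 : Int) < w - 1 then w.toNat - 1 - 1 else 0) = w.toNat - 2 := by
    split <;> omega
  rw [hcnt2]
  have hsucc : w.toNat - 1 = (w.toNat - 2) + 1 := by omega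
  rw [hsucc, List.range_succ_eq_map, List.map_cons, List.map_map]
  congr 1
  · norm_num
  · apply List.map_congr_left
    intro k _
    simp only [Function.comp_apply]
    push_cast
    ring

theorem pvB_bridge :
    ∀ (n : Nat) (w : Int), w.toNat ≤ n →
      ∀ (st : List Int × PySem.Dict Int (List (Int × Int))),
      ((PySem.List.pyRange w 1 (-1)).foldl
        (fun st v => (PySem.Dict.getD st.2 v []).foldl pvStepB st) st).1
        = pvProcB w st.2 st.1 := by
  intro n
  induction n with
  | zero =>
    intro w hw st
    rw [pvRange_nil (by omega), List.foldl_nil, pvProcB_le_one _ _ (by omega)]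
  | succ n ih =>
    intro w hw st
    by_cases h1 : w ≤ 1
    · rw [pvRange_nil h1, List.foldl_nil, pvProcB_le_one _ _ h1]
    · rw [pvRange_cons (by omega), List.foldl_cons, ih (w - 1) (by omega),
        pvProcB_eq_M _ _ h1]
      rfl

-- ----- the simulation -----

theorem pvSIM :
    ∀ (n : Nat), ∀ (f : Nat) (L : List (Int × Int)) (order : List Int) (seen : PySem.Set Int)
      (w : Int) (pend : List (Int × Int)) (D : PySem.Dict Int (List (Int × Int)))
      (J : List (Int × Int)),
      2 * pvSumW L + L.length ≤ f →
      2 * pvSumW L + L.length + w.toNat ≤ n →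
      2 ≤ w →
      pvSortA L = pend ++ pvFlat (w - 1) D ++ J →
      pvGoodD D →
      (∀ p ∈ pend, pvKey p = w) →
      (∀ p ∈ J, pvKey p = 1) →
      pvINV L seen →
      (pvLoopA f L order seen).1 = pvProcM w pend D order := by
  intro n
  induction n with
  | zero =>
    intro f L order seen w pend D J hf hm hw _ _ _ _ _
    exfalso
    omega
  | succ n ih =>
    intro f L order seen w pend D J hf hm hw hsort hD hpend hJ hinv
    cases pend with
    | nil =>
      rw [pvProcM_nil]
      by_cases hw2 : w - 1 ≤ 1
      · rw [pvProcB_le_one _ _ hw2]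
        rw [pvFlat_le_one D hw2] at hsort
        simp only [List.nil_append, List.append_nil] at hsort
        have hkeys : ∀ p ∈ L, pvKey p ≤ 1 := by
          intro p hp
          have hmem := pvMem_sortA hp
          rw [hsort] at hmem
          exact le_of_eq (hJ p hmem)
        rw [pvLoopA_junk f L (by omega) order seen hkeys]
      · rw [pvProcB_eq_M _ _ hw2]
        refine ih f L order seen (w - 1) (PySem.Dict.getD D (w - 1) []) D J hf ?_ (by omega) ?_
          hD (fun p hp => hD (w - 1) p hp) hJ hinv
        · omega
        · rw [pvFlat_unfold D hw2] at hsort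
          simpa [List.append_assoc] using hsort
    | cons q brest =>
      obtain ⟨l, r⟩ := q
      have hkq : r - l = w := hpend (l, r) (by simp)
      have hbrest : ∀ p ∈ brest, pvKey p = w := fun p hp => hpend p (by simp [hp])
      have hsort' : pvSortA L = (l, r) :: (brest ++ pvFlat (w - 1) D ++ J) := by
        simpa using hsort
      have hstats := pvSortA_cons_stats hsort'
      have hnot : ¬ r - l ≤ 1 := by omega
      have hb := pvMid_bounds hnot
      have hqL : (l, r) ∈ L := pvSortA_mem (by rw [hsort']; simp)
      have hcont : PySem.Set.contains seen (PySem.Int.floordiv (l + r) 2) = false :=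
        hinv.2.1 (l, r) hqL _ ⟨hb.1, hb.2⟩
      obtain ⟨f', rfl⟩ : ∃ f', f = f' + 1 := by
        refine ⟨f - 1, ?_⟩
        omega
      rw [pvLoopA_cons_step hsort', if_neg hnot, if_neg (by rw [hcont]; simp), pvProcM_cons]
      have hdesc : pvDesc (brest ++ pvFlat (w - 1) D ++ J) :=
        pvDesc_structured hD hw hbrest hJ
      have hkey1 : pvKey (l, PySem.Int.floordiv (l + r) 2)
          = PySem.Int.floordiv (l + r) 2 - l := rfl
      have hkey2 : pvKey (PySem.Int.floordiv (l + r) 2, r)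
          = r - PySem.Int.floordiv (l + r) 2 := rfl
      have hs1 := pvInsStep (c := (l, PySem.Int.floordiv (l + r) 2)) hD hw hbrest hJ
        (by rw [hkey1]; omega) (by rw [hkey1]; omega)
      rw [hkey1] at hs1
      have hJ1 : ∀ p ∈ (if PySem.Int.floordiv (l + r) 2 - l = 1
          then J ++ [(l, PySem.Int.floordiv (l + r) 2)] else J), pvKey p = 1 := by
        intro p hp
        by_cases hk1 : PySem.Int.floordiv (l + r) 2 - l = 1
        · rw [if_pos hk1] at hp
          rcases List.mem_append.mp hp with hp | hp
          · exact hJ p hp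
          · simp only [List.mem_singleton] at hp
            rw [hp, hkey1, hk1]
        · rw [if_neg hk1] at hp
          exact hJ p hp
      have hD1 : pvGoodD (pvPush D (PySem.Int.floordiv (l + r) 2 - l)
          (l, PySem.Int.floordiv (l + r) 2)) := pvGoodD_push hD hkey1
      have hs2 := pvInsStep (c := (PySem.Int.floordiv (l + r) 2, r)) hD1 hw hbrest hJ1
        (by rw [hkey2]; omega) (by rw [hkey2]; omega)
      rw [hkey2] at hs2
      have hJ2 : ∀ p ∈ (if r - PySem.Int.floordiv (l + r) 2 = 1
          then (if PySem.Int.floordiv (l + r) 2 - l = 1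
            then J ++ [(l, PySem.Int.floordiv (l + r) 2)] else J)
              ++ [(PySem.Int.floordiv (l + r) 2, r)]
          else (if PySem.Int.floordiv (l + r) 2 - l = 1
            then J ++ [(l, PySem.Int.floordiv (l + r) 2)] else J)), pvKey p = 1 := by
        intro p hp
        by_cases hk2 : r - PySem.Int.floordiv (l + r) 2 = 1
        · rw [if_pos hk2] at hp
          rcases List.mem_append.mp hp with hp | hp
          · exact hJ1 p hp
          · simp only [List.mem_singleton] at hp
            rw [hp, hkey2, hk2]
        · rw [if_neg hk2] at hp
          exact hJ1 p hp
      have hsum' : pvSumW ((brest ++ pvFlat (w - 1) D ++ J)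
          ++ [(l, PySem.Int.floordiv (l + r) 2), (PySem.Int.floordiv (l + r) 2, r)])
          = pvSumW (brest ++ pvFlat (w - 1) D ++ J)
            + ((PySem.Int.floordiv (l + r) 2 - l - 1).toNat
              + (r - PySem.Int.floordiv (l + r) 2 - 1).toNat) := by
        simp only [pvSumW, List.map_append, List.sum_append, List.map_cons, List.sum_cons,
          List.map_nil, List.sum_nil]
        omega
      obtain ⟨hb1, hb2⟩ := hb
      have hst1 := hstats.1
      have hst2 := hstats.2
      refine ih f' _ _ _ w brest _ _ ?_ ?_ hw ?_ (pvGoodD_push hD1 hkey2) hbrest hJ2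
        (pvINV_step hsort' hinv hb1 hb2)
      · rw [hsum']
        simp only [List.length_append, List.length_cons, List.length_nil] at hst2 ⊢
        omega
      · rw [hsum']
        simp only [List.length_append, List.length_cons, List.length_nil] at hst2 ⊢
        omega
      · rw [pvSortA_append_pair _ _ _ hdesc, hs1, hs2]

-- ----- D0 facts and assembly -----

theorem pvD0_getD (count v : Int) :
    PySem.Dict.getD (PySem.Dict.ofList [(count - 1, [((0 : Int), count - 1)])]) v []
      = if v = count - 1 then [(0, count - 1)] else [] := by
  have h : PySem.Dict.ofList [(count - 1, [((0 : Int), count - 1)])]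
      = PySem.Dict.empty.insert (count - 1) [(0, count - 1)] := rfl
  rw [h, PySem.Dict.getD_insert]
  split <;> rfl

theorem pvD0_Good (count : Int) :
    pvGoodD (PySem.Dict.ofList [(count - 1, [((0 : Int), count - 1)])]) := by
  intro v p hp
  rw [pvD0_getD] at hp
  by_cases hv : v = count - 1
  · rw [if_pos hv] at hp
    simp only [List.mem_singleton] at hp
    rw [hp, hv]
    simp [pvKey]
  · rw [if_neg hv] at hp
    cases hp

theorem pvINV0 (count : Int) (hc : 2 ≤ count) :
    pvINV [((0 : Int), count - 1)] (PySem.Set.ofList [0, count - 1]) := by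
  refine ⟨?_, ?_, List.pairwise_singleton _ _⟩
  · intro p hp
    simp only [List.mem_singleton] at hp
    rw [hp]
    simp only [pvKey]
    omega
  · intro p hp m hm
    simp only [List.mem_singleton] at hp
    subst hp
    obtain ⟨h1, h2⟩ := hm
    simp only at h1 h2
    rw [pvContains_false]
    intro hmem
    rw [PySem.Set.mem_ofList] at hmem
    simp only [List.mem_cons, List.mem_singleton] at hmem
    rcases hmem with rfl | rfl | h
    · omega
    · omega
    · cases h

theorem pvMain (count : Int) :
    coverage_priority_index_order_py count = coverage_priority_index_order_py_alt count := by
  by_cases h0 : count ≤ 0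
  · simp [coverage_priority_index_order_py, coverage_priority_index_order_py_alt, if_pos h0]
  by_cases h1 : count = 1
  · subst h1
    norm_num [coverage_priority_index_order_py, coverage_priority_index_order_py_alt]
  have hc2 : 2 ≤ count := by omega
  simp only [coverage_priority_index_order_py, coverage_priority_index_order_py_alt,
    if_neg h0, if_neg h1]
  rw [pvB_bridge (count - 1).toNat (count - 1) le_rfl
    (([0, count - 1] : List Int),
      PySem.Dict.ofList [(count - 1, [((0 : Int), count - 1)])])]
  have hinv0 := pvINV0 count hc2
  have hsum0 : pvSumW [((0 : Int), count - 1)] = (count - 2).toNat := by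
    simp [pvSumW]
    omega
  have hfuel : 2 * pvSumW [((0 : Int), count - 1)]
      + ([((0 : Int), count - 1)] : List (Int × Int)).length ≤ 2 * count.toNat + 2 := by
    rw [hsum0]
    simp
    omega
  have hlen := pvLoopA_len (2 * count.toNat + 2) [((0 : Int), count - 1)] hfuel
    [0, count - 1] (PySem.Set.ofList [0, count - 1]) hinv0
  rw [if_neg (by rw [hlen, hsum0]; simp; omega)]
  by_cases h2 : count = 2
  · subst h2
    rw [pvProcB_le_one _ _ (by norm_num)]
    rw [pvLoopA_junk _ [((0 : Int), 2 - 1)] (by simp) _ _ ?_]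
    intro p hp
    simp only [List.mem_singleton] at hp
    rw [hp]
    simp [pvKey]
  · have hc3 : 3 ≤ count := by omega
    rw [pvProcB_eq_M _ _ (by omega)]
    rw [show PySem.Dict.getD (PySem.Dict.ofList [(count - 1, [((0 : Int), count - 1)])])
        (count - 1) [] = [(0, count - 1)] from by rw [pvD0_getD]; simp]
    refine pvSIM
      (2 * pvSumW [((0 : Int), count - 1)] + ([((0 : Int), count - 1)] : List (Int × Int)).length
        + (count - 1).toNat)
      _ _ _ _ _ _ _ [] hfuel le_rfl (by omega) ?_ (pvD0_Good count) ?_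
      (by intro p hp; cases hp) hinv0
    · rw [pvSortA_singleton,
        pvFlat_empty (count - 2).toNat (count - 1 - 1) (by omega)
          (fun v h2v h3v => by rw [pvD0_getD, if_neg (by omega)])]
      simp
    · intro p hp
      simp only [List.mem_singleton] at hp
      rw [hp]
      simp [pvKey]

-- ===== VERDICT (by name: the statement is the Claim_ definition above) =====
theorem coverage_priority_index_order_py_spec : Claim_equal_coverage_priority_index_order_py := by
  unfold Claim_equal_coverage_priority_index_order_py
  intro count _
  unfold Spec_coverage_priority_index_order_py
  exact pvMain count
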